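-- pv_equiv track=rewrite | github.com/honggoii/ProblemSolving | Programmers/Level-2/37.py | solution
-- ===== SOURCE A (Python) =====
-- def balanced(p): # 균형잡힌 괄호 문자열
--     left = 0 # ( 개수
--     right = 0 # ) 개수
--
--     for i in range(len(p)):
--         if p[i] == '(':
--             left += 1
--         elif p[i] == ')':
--             right += 1
--
--         if left == right:
--             return i # 균형잡힌 괄호
--
-- def alright(p): # 올바른 괄호 문자열
--     cnt = 0 # 여는 괄호면 +, 닫는 괄호면 -
--     for i in p:
--         if i == '(':
--             cnt += 1
--         elif i == ')':
--             if cnt == 0: # 닫는 괄호가 더 많은 경우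
--                 return False
--             cnt -= 1
--
--     return True # 짝이 맞는 경우
--
-- def solution(p):
--     answer = ''
--     if p == '':
--         return answer
--     idx = balanced(p)
--     u = p[:idx+1]
--     v = p[idx+1:]
--
--     if alright(u): # u가 올바른 괄호 문자열이면
--         answer = u + solution(v)
--     else: # u가 올바른 괄호가 아니면
--         answer = '('
--         answer += solution(v)
--         answer += ')'
--         u = list(u[1:-1]) # 처음과 마지막 제거
--         for i in range(len(u)): # u 뒤집기
--             if u[i] == '(':
--                 answer += ')'
--             elif u[i] == ')':
--                 answer += '('
--     return answer
-- ===== SOURCE B (Python) =====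
-- def correct(s):
--     bal = 0
--     for c in s:
--         if c == '(':
--             bal += 1
--         elif c == ')':
--             bal -= 1
--         if bal < 0:
--             return False
--     return True
--
-- def solution(p):
--     # one scan: cut a chunk each time the running balance returns to 0
--     chunks = []
--     cur = []
--     bal = 0
--     for c in p:
--         if c == '(':
--             bal += 1
--         elif c == ')':
--             bal -= 1
--         cur.append(c)
--         if bal == 0:
--             chunks.append(''.join(cur))
--             cur = []
--     if bal != 0:
--         raise ValueError("not a balanced parenthesis string")
--     # right-fold over the chunk list instead of recursion on the tail
--     acc = ''
--     for chunk in reversed(chunks):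
--         if correct(chunk):
--             acc = chunk + acc
--         else:
--             inner = ''.join(')' if c == '(' else '(' if c == ')' else '' for c in chunk[1:-1])
--             acc = '(' + acc + ')' + inner
--     return acc
-- ===== Notes on version B (the rewrite author's own statement) =====
-- stated objective: alternative
-- what changed: Replaces A's recursion on the remaining tail (which re-scans and slices the string at every level) by a single balance-counter scan that collects the balanced chunks plus one reverse fold over the chunk list; unbalanced input is rejected by the final balance instead of A's TypeError.
import Mathlib
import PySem

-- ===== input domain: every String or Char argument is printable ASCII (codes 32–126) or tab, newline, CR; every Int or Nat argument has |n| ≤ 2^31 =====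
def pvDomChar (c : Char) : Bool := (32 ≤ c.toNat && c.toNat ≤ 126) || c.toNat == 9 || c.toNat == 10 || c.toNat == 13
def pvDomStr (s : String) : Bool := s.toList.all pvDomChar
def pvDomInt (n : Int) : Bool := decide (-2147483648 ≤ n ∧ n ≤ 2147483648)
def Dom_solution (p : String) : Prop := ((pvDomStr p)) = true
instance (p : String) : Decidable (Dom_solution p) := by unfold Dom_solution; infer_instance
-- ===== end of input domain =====

-- B replaces A's recursion on the tail by one balance-counter scan that cuts the balanced
-- chunks, followed by a right-fold over the chunk list (objective: alternative decomposition).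

-- ===== PORT A =====
-- 'for i in range(len(p))' with 'p[i]' is ported as structural recursion over the chars,
-- carrying left/right/i exactly as the Python does; returns none where Python returns None.
def pvBalancedAux : List Char → Int → Int → Nat → Option Nat
  | [], _, _, _ => none
  | c :: cs, left, right, i =>
    let lr : Int × Int :=
      if c = '(' then (left + 1, right)
      else if c = ')' then (left, right + 1)
      else (left, right)
    if lr.1 = lr.2 then some i else pvBalancedAux cs lr.1 lr.2 (i + 1)

def pvAlrightAux : List Char → Int → Bool
  | [], _ => true
  | c :: cs, cnt =>
    if c = '(' then pvAlrightAux cs (cnt + 1)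
    else if c = ')' then
      if cnt = 0 then false else pvAlrightAux cs (cnt - 1)
    else pvAlrightAux cs cnt

-- A's final for-loop over u[1:-1], appending ')' for '(' and '(' for ')' (nothing otherwise)
def pvFlip : List Char → List Char
  | [] => []
  | c :: cs => (if c = '(' then [')'] else if c = ')' then ['('] else []) ++ pvFlip cs

-- p[:idx+1] = take (idx+1), p[idx+1:] = drop (idx+1) (idx ≥ 0), u[1:-1] = (drop 1 u).dropLast:
-- exact for these nonnegative slice bounds. 'none' branch is where Python raises TypeError
-- (excluded by Pre_solution).
def pvSolutionAux (l : List Char) : List Char :=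
  if _h : l = [] then []
  else
    match pvBalancedAux l 0 0 0 with
    | none => []
    | some idx =>
      if pvAlrightAux (l.take (idx + 1)) 0 then
        l.take (idx + 1) ++ pvSolutionAux (l.drop (idx + 1))
      else
        '(' :: (pvSolutionAux (l.drop (idx + 1)) ++ ')' :: pvFlip (((l.take (idx + 1)).drop 1).dropLast))
  termination_by l.length
  decreasing_by
    all_goals
      have : 0 < l.length := List.length_pos_of_ne_nil _h
      simp [List.length_drop]; omega

def solution (p : String) : String := String.mk (pvSolutionAux p.toList)

-- ===== PORT B =====
def pvCorrectAux : List Char → Int → Bool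
  | [], _ => true
  | c :: cs, bal =>
    let bal' := if c = '(' then bal + 1 else if c = ')' then bal - 1 else bal
    if bal' < 0 then false else pvCorrectAux cs bal'

-- the single chunk-cutting scan: cur accumulates the current chunk, cut when bal returns
-- to 0; also returns the final balance (B raises ValueError when it is nonzero)
def pvScanAux : List Char → Int → List Char → List (List Char) × Int
  | [], bal, _ => ([], bal)
  | c :: cs, bal, cur =>
    let bal' := if c = '(' then bal + 1 else if c = ')' then bal - 1 else bal
    let cur' := cur ++ [c]
    if bal' = 0 then
      let r := pvScanAux cs 0 []
      (cur' :: r.1, r.2)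
    else pvScanAux cs bal' cur'

def pvFlipChar (c : Char) : List Char :=
  if c = '(' then [')'] else if c = ')' then ['('] else []

def pvStep (acc : List Char) (chunk : List Char) : List Char :=
  if pvCorrectAux chunk 0 then chunk ++ acc
  else '(' :: (acc ++ ')' :: ((chunk.drop 1).dropLast.flatMap pvFlipChar))

-- the 'if bal != 0: raise ValueError' branch returns "" here; Pre_solution excludes it
def solution_alt (p : String) : String :=
  let r := pvScanAux p.toList 0 []
  if r.2 ≠ 0 then "" else String.mk ((r.1.reverse).foldl pvStep [])

-- ===== PRECONDITION & SPEC =====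
-- Pre_ excludes exactly the inputs on which A raises TypeError (balanced returns None at
-- some recursion step, which happens iff the '(' and ')' counts differ).
def Pre_solution (p : String) : Prop := p.toList.count '(' = p.toList.count ')'
instance (p : String) : Decidable (Pre_solution p) := by unfold Pre_solution; infer_instance

def pvWitness_solution : String := ")(()"

def Spec_solution (p : String) (out : String) : Prop := out = solution_alt p
instance (p : String) (out : String) : Decidable (Spec_solution p out) := by unfold Spec_solution; infer_instance

-- ===== CLAIM (what is proved, stated in full; the proofs are below) =====
def Claim_equal_solution : Prop := ∀ (p : String), Dom_solution p → Pre_solution p → Spec_solution p (solution p)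

-- ===== LEMMAS AND PROOFS =====

-- the per-character balance step both scans use
def pvDelta (c : Char) : Int := if c = '(' then 1 else if c = ')' then -1 else 0

def pvBalTotal : List Char → Int
  | [] => 0
  | c :: cs => pvDelta c + pvBalTotal cs

-- index (0-based) of the first position where the running balance (started at bal) hits 0
def pvFirstZero : List Char → Int → Option Nat
  | [], _ => none
  | c :: cs, bal =>
    if bal + pvDelta c = 0 then some 0 else (pvFirstZero cs (bal + pvDelta c)).map (· + 1)

theorem pvBalancedAux_eq (l : List Char) : ∀ (left right : Int) (i : Nat),
    pvBalancedAux l left right i = (pvFirstZero l (left - right)).map (i + ·) := by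
  induction l with
  | nil => intro left right i; simp [pvBalancedAux, pvFirstZero]
  | cons c cs ih =>
    intro left right i
    have key : ∀ L R : Int, L - R = (left - right) + pvDelta c →
        (if L = R then some i else pvBalancedAux cs L R (i + 1)) =
          Option.map (i + ·) (pvFirstZero (c :: cs) (left - right)) := by
      intro L R hLR
      rw [pvFirstZero, ← hLR]
      by_cases h : L = R
      · rw [if_pos h, if_pos (by omega)]; simp
      · rw [if_neg h, if_neg (by omega), ih]
        cases pvFirstZero cs (L - R)
        · simp
        · simp; omega
    rw [pvBalancedAux]
    by_cases h1 : c = '('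
    · subst h1
      simp only []
      exact key (left + 1) right (by simp [pvDelta]; omega)
    · by_cases h2 : c = ')'
      · subst h2
        simp only [if_neg h1]
        exact key left (right + 1) (by simp [pvDelta]; omega)
      · simp only [if_neg h1, if_neg h2]
        exact key left right (by simp [pvDelta, h1, h2])

theorem pvScanAux_snd (l : List Char) : ∀ (bal : Int) (cur : List Char),
    (pvScanAux l bal cur).2 = bal + pvBalTotal l := by
  induction l with
  | nil => intro bal cur; simp [pvScanAux, pvBalTotal]
  | cons c cs ih =>
    intro bal cur
    simp only [pvScanAux, pvBalTotal, pvDelta]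
    by_cases h : (if c = '(' then bal + 1 else if c = ')' then bal - 1 else bal) = 0
    · rw [if_pos h]
      simp only [ih]
      split_ifs at h ⊢ <;> omega
    · rw [if_neg h, ih]
      split_ifs <;> omega

theorem pvScanAux_fst (l : List Char) : ∀ (bal : Int) (cur : List Char),
    (pvScanAux l bal cur).1 =
      match pvFirstZero l bal with
      | none => []
      | some j => (cur ++ l.take (j + 1)) :: (pvScanAux (l.drop (j + 1)) 0 []).1 := by
  induction l with
  | nil => intro bal cur; simp [pvScanAux, pvFirstZero]
  | cons c cs ih =>
    intro bal cur
    simp only [pvScanAux, pvFirstZero, pvDelta]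
    by_cases h : bal + (if c = '(' then (1:Int) else if c = ')' then -1 else 0) = 0
    · have hb : (if c = '(' then bal + 1 else if c = ')' then bal - 1 else bal) = 0 := by
        split_ifs at h ⊢ <;> omega
      simp [h, hb]
    · have hb : ¬ (if c = '(' then bal + 1 else if c = ')' then bal - 1 else bal) = 0 := by
        split_ifs at h ⊢ <;> omega
      have he : (if c = '(' then bal + 1 else if c = ')' then bal - 1 else bal)
          = bal + (if c = '(' then (1:Int) else if c = ')' then -1 else 0) := by
        split_ifs <;> omega
      rw [if_neg h, if_neg hb, ih, he]
      cases pvFirstZero cs (bal + (if c = '(' then (1:Int) else if c = ')' then -1 else 0)) with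
      | none => simp
      | some j => simp

theorem pvFirstZero_none (l : List Char) : ∀ bal, pvFirstZero l bal = none →
    bal + pvBalTotal l = 0 → l = [] := by
  induction l with
  | nil => intro bal _ _; rfl
  | cons c cs ih =>
    intro bal h htot
    simp only [pvFirstZero] at h
    by_cases h0 : bal + pvDelta c = 0
    · simp [h0] at h
    · rw [if_neg h0, Option.map_eq_none_iff] at h
      have := ih (bal + pvDelta c) h (by simp [pvBalTotal] at htot; omega)
      subst this
      simp [pvBalTotal] at htot
      omega

theorem pvFirstZero_take (l : List Char) : ∀ bal j, pvFirstZero l bal = some j →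
    bal + pvBalTotal (l.take (j + 1)) = 0 ∧ j + 1 ≤ l.length := by
  induction l with
  | nil => intro bal j h; simp [pvFirstZero] at h
  | cons c cs ih =>
    intro bal j h
    simp only [pvFirstZero] at h
    by_cases h0 : bal + pvDelta c = 0
    · rw [if_pos h0] at h
      cases h
      simp [pvBalTotal]
      omega
    · rw [if_neg h0, Option.map_eq_some_iff] at h
      obtain ⟨j', hj', rfl⟩ := h
      have := ih (bal + pvDelta c) j' hj'
      constructor
      · simpa [pvBalTotal, List.take, add_assoc] using this.1
      · simp; omega

theorem pvBalTotal_append (u v : List Char) : pvBalTotal (u ++ v) = pvBalTotal u + pvBalTotal v := by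
  induction u with
  | nil => simp [pvBalTotal]
  | cons c cs ih => simp [pvBalTotal, ih]; ring

theorem pvBalTotal_count (l : List Char) :
    pvBalTotal l = (l.count '(' : Int) - l.count ')' := by
  induction l with
  | nil => simp [pvBalTotal]
  | cons c cs ih =>
    simp only [pvBalTotal, pvDelta, ih, List.count_cons]
    by_cases h1 : c = '(' <;> by_cases h2 : c = ')' <;>
      simp [h1, h2, beq_iff_eq] at * <;> omega

theorem pvAlright_eq_correct (l : List Char) : ∀ cnt : Int, 0 ≤ cnt →
    pvAlrightAux l cnt = pvCorrectAux l cnt := by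
  induction l with
  | nil => intro cnt _; rfl
  | cons c cs ih =>
    intro cnt hcnt
    by_cases h1 : c = '('
    · subst h1
      have hL : pvAlrightAux ('(' :: cs) cnt = pvAlrightAux cs (cnt + 1) := by
        simp [pvAlrightAux]
      have hR : pvCorrectAux ('(' :: cs) cnt
          = if cnt + 1 < 0 then false else pvCorrectAux cs (cnt + 1) := by
        simp [pvCorrectAux]
      rw [hL, hR, if_neg (by omega), ih _ (by omega)]
    · by_cases h2 : c = ')'
      · subst h2
        have hL : pvAlrightAux (')' :: cs) cnt
            = if cnt = 0 then false else pvAlrightAux cs (cnt - 1) := by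
          simp [pvAlrightAux]
        have hR : pvCorrectAux (')' :: cs) cnt
            = if cnt - 1 < 0 then false else pvCorrectAux cs (cnt - 1) := by
          simp [pvCorrectAux]
        rw [hL, hR]
        by_cases h3 : cnt = 0
        · rw [if_pos h3, if_pos (by omega)]
        · rw [if_neg h3, if_neg (by omega), ih _ (by omega)]
      · have hL : pvAlrightAux (c :: cs) cnt = pvAlrightAux cs cnt := by
          simp [pvAlrightAux, h1, h2]
        have hR : pvCorrectAux (c :: cs) cnt
            = if cnt < 0 then false else pvCorrectAux cs cnt := by
          simp [pvCorrectAux, h1, h2]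
        rw [hL, hR, if_neg (by omega), ih _ hcnt]

theorem pvFlip_eq_flatMap (l : List Char) : pvFlip l = l.flatMap pvFlipChar := by
  induction l with
  | nil => simp [pvFlip]
  | cons c cs ih => simp [pvFlip, pvFlipChar, ih]

theorem pvMain (n : Nat) : ∀ l : List Char, l.length ≤ n → pvBalTotal l = 0 →
    pvSolutionAux l = (((pvScanAux l 0 []).1.reverse).foldl pvStep []) := by
  induction n with
  | zero =>
    intro l hlen _
    have : l = [] := List.eq_nil_of_length_eq_zero (Nat.le_zero.mp hlen)
    subst this
    simp [pvSolutionAux, pvScanAux]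
  | succ n ih =>
    intro l hlen hbal0
    by_cases hne : l = []
    · subst hne; simp [pvSolutionAux, pvScanAux]
    · cases hfz : pvFirstZero l 0 with
      | none => exact absurd (pvFirstZero_none l 0 hfz (by omega)) hne
      | some j =>
        have hbal : pvBalancedAux l 0 0 0 = some j := by
          rw [pvBalancedAux_eq, show (0 : Int) - 0 = 0 by omega, hfz]; simp
        have hch : (pvScanAux l 0 []).1
            = l.take (j + 1) :: (pvScanAux (l.drop (j + 1)) 0 []).1 := by
          rw [pvScanAux_fst]; simp [hfz]
        obtain ⟨htk, hjlen⟩ := pvFirstZero_take l 0 j hfz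
        have hsplit : pvBalTotal (l.take (j + 1)) + pvBalTotal (l.drop (j + 1)) = pvBalTotal l := by
          rw [← pvBalTotal_append, List.take_append_drop]
        have hv : pvBalTotal (l.drop (j + 1)) = 0 := by omega
        have hvlen : (l.drop (j + 1)).length ≤ n := by
          simp [List.length_drop]; omega
        have hih := ih (l.drop (j + 1)) hvlen hv
        rw [pvSolutionAux, dif_neg hne, hbal, hch]
        simp only [List.reverse_cons, List.foldl_append, List.foldl_cons, List.foldl_nil]
        rw [← hih, pvStep, pvAlright_eq_correct _ 0 le_rfl, pvFlip_eq_flatMap]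

theorem solution_spec : Claim_equal_solution := by
  intro p _ hpre
  unfold Spec_solution solution solution_alt
  have h0 : pvBalTotal p.toList = 0 := by
    rw [pvBalTotal_count]
    unfold Pre_solution at hpre
    omega
  have hsnd : (pvScanAux p.toList 0 []).2 = 0 := by
    rw [pvScanAux_snd]; omega
  simp only [hsnd]
  rw [if_neg (by simp), pvMain p.toList.length p.toList le_rfl h0]
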